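-- pv_equiv track=rewrite | github.com/igor-bbb/bon-buasson-bridge | app/api/routes.py | _extract_navigation_names
-- ===== SOURCE A (Python) =====
-- def _extract_navigation_names(payload, drain):
--     raw = payload.get('navigation') or {}
--     names = []
--     seen = set()
--     if isinstance(raw, dict):
--         source_items = raw.get('vector') or raw.get('items') or []
--         for item in source_items:
--             name = str(item or '').strip()
--             if name and name not in seen:
--                 names.append(name)
--                 seen.add(name)
--     if not names:
--         for item in drain.get('items') or []:
--             name = str(item.get('object_name') or '').strip()
--             if name and name not in seen:
--                 names.append(name)
--                 seen.add(name)
--     return names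
-- ===== SOURCE B (Python) =====
-- def _extract_navigation_names(payload, drain):
--     # Stage 1: materialise the stripped candidate pool (primary source, else drain fallback).
--     raw = payload.get('navigation') or {}
--     if isinstance(raw, dict):
--         primary = [str(i or '').strip() for i in (raw.get('vector') or raw.get('items') or [])]
--     else:
--         primary = []
--     if any(primary):
--         pool = primary
--     else:
--         pool = [str(i.get('object_name') or '').strip() for i in (drain.get('items') or [])]
--     # Stage 2: dedup by recursively deleting every later copy of the head (no seen set).
--     return _dedup(pool)
--
--
-- def _dedup(pool):
--     if not pool:
--         return []
--     head, rest = pool[0], pool[1:]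
--     if not head:
--         return _dedup(rest)
--     return [head] + _dedup([x for x in rest if x != head])
-- ===== Notes on version B (the rewrite author's own statement) =====
-- stated objective: alternative
-- what changed: B first materialises the whole stripped candidate pool (primary source or drain fallback chosen by any()), then deduplicates it with a recursive delete-later-copies algorithm (head :: dedup(rest minus head)) instead of A's single left-to-right pass appending under a mutable seen set.
import Mathlib
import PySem

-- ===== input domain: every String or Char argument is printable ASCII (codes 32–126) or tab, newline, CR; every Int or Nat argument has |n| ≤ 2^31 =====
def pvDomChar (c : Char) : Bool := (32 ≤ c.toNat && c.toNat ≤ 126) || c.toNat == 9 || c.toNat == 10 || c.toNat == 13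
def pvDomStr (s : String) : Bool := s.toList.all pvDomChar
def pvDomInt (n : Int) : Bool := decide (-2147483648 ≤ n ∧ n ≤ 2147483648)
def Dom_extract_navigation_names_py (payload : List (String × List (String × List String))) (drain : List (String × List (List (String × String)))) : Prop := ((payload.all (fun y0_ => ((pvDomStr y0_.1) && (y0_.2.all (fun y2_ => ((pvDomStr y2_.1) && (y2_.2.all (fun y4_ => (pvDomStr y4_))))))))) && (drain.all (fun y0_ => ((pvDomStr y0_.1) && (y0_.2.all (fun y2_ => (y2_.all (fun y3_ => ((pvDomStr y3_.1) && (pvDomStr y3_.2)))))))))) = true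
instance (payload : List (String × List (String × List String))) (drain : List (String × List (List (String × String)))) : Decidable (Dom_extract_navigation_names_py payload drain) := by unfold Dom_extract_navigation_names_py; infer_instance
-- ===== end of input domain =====

-- B materialises the whole stripped candidate pool first (primary source or drain fallback,
-- chosen by any()) and then deduplicates it by recursively deleting every later copy of the
-- head, replacing A's single left-to-right pass with a mutable seen set (alternative, not faster).

-- ===== PORT A =====
def extract_navigation_names_py (payload : List (String × List (String × List String))) (drain : List (String × List (List (String × String)))) : List String :=
  -- dicts are association lists; d.get(k) = first-match List.lookup (exact per the type convention)
  -- raw = payload.get('navigation') or {}   (None and the empty dict both become [])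
  let raw := (List.lookup "navigation" payload).getD []
  -- source_items = raw.get('vector') or raw.get('items') or []
  let v := (List.lookup "vector" raw).getD []
  let source_items := if v = [] then (List.lookup "items" raw).getD [] else v
  -- first loop over source_items maintaining (names, seen); str(item or '').strip() = item.strip()
  let st := source_items.foldl
    (fun (st : List String × PySem.Set String) item =>
      let name := PySem.Str.strip item
      if name ≠ "" ∧ ¬ PySem.Set.contains st.2 name
      then (st.1 ++ [name], PySem.Set.add st.2 name) else st)
    ([], [])
  -- if not names: second loop over drain.get('items') or [], continuing with the same names/seen
  if st.1 = [] then
    (((List.lookup "items" drain).getD []).foldl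
      (fun (st : List String × PySem.Set String) item =>
        let name := PySem.Str.strip ((List.lookup "object_name" item).getD "")
        if name ≠ "" ∧ ¬ PySem.Set.contains st.2 name
        then (st.1 ++ [name], PySem.Set.add st.2 name) else st)
      st).1
  else st.1

-- ===== PORT B =====
-- B's helper _dedup: skip an empty head, otherwise keep the head and delete all its later copies.
def pvDedupB : List String → List String
  | [] => []
  | h :: rest =>
    if h = "" then pvDedupB rest
    else h :: pvDedupB (rest.filter (fun x => decide (x ≠ h)))
termination_by l => l.length
decreasing_by
  · simp
  · have := List.length_filter_le (fun x => !decide ((x : {x // x ∈ rest}).val = h)) rest.attach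
    simp at this ⊢
    omega

def extract_navigation_names_py_alt (payload : List (String × List (String × List String))) (drain : List (String × List (List (String × String)))) : List String :=
  let raw := (List.lookup "navigation" payload).getD []
  let v := (List.lookup "vector" raw).getD []
  -- primary = [str(i or '').strip() for i in (raw.get('vector') or raw.get('items') or [])]
  let primary := (if v = [] then (List.lookup "items" raw).getD [] else v).map PySem.Str.strip
  -- pool = primary if any(primary) else the stripped drain object_names
  let pool :=
    if primary.any (fun n => decide (n ≠ "")) then primary
    else ((List.lookup "items" drain).getD []).map
        (fun i => PySem.Str.strip ((List.lookup "object_name" i).getD ""))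
  pvDedupB pool

-- ===== PRECONDITION & SPEC =====
def Spec_extract_navigation_names_py (payload : List (String × List (String × List String))) (drain : List (String × List (List (String × String)))) (out : List String) : Prop := out = extract_navigation_names_py_alt payload drain
instance (payload : List (String × List (String × List String))) (drain : List (String × List (List (String × String)))) (out : List String) : Decidable (Spec_extract_navigation_names_py payload drain out) := by unfold Spec_extract_navigation_names_py; infer_instance

-- ===== CLAIM (what is proved, stated in full; the proofs are below) =====
def Claim_equal_extract_navigation_names_py : Prop := ∀ (payload : List (String × List (String × List String))) (drain : List (String × List (List (String × String)))), Dom_extract_navigation_names_py payload drain → Spec_extract_navigation_names_py payload drain (extract_navigation_names_py payload drain)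

-- ===== LEMMAS AND PROOFS =====

-- proof helper: pvDedupB without the empty-skip (delete-later-copies dedup of a list)
def pvDedupF : List String → List String
  | [] => []
  | h :: rest => h :: pvDedupF (rest.filter (fun x => decide (x ≠ h)))
termination_by l => l.length
decreasing_by
  have := List.length_filter_le (fun x => !decide ((x : {x // x ∈ rest}).val = h)) rest.attach
  simp at this ⊢
  omega

theorem pvDedupF_nil : pvDedupF [] = [] := by simp [pvDedupF]

theorem pvDedupF_cons (h : String) (t : List String) :
    pvDedupF (h :: t) = h :: pvDedupF (t.filter (fun x => decide (x ≠ h))) := by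
  simp [pvDedupF]

theorem pvDedupB_nil : pvDedupB [] = [] := by simp [pvDedupB]

theorem pvDedupB_cons (h : String) (t : List String) :
    pvDedupB (h :: t) =
      if h = "" then pvDedupB t else h :: pvDedupB (t.filter (fun x => decide (x ≠ h))) := by
  simp [pvDedupB]

theorem pvDedupF_nil_iff (l : List String) : pvDedupF l = [] ↔ l = [] := by
  cases l <;> simp [pvDedupF_nil, pvDedupF_cons]

-- A's names/seen loop keeps seen equal (as a list) to names; both equal folding Set.add
-- over the stripped-and-filtered names.
theorem pvLoop_eq {α : Type} (f : α → String) (xs : List α) (s : List String) :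
    xs.foldl
      (fun (st : List String × PySem.Set String) item =>
        let name := f item
        if name ≠ "" ∧ ¬ PySem.Set.contains st.2 name
        then (st.1 ++ [name], PySem.Set.add st.2 name) else st)
      (s, s)
    = (((xs.map f).filter (fun n => decide (n ≠ ""))).foldl PySem.Set.add s,
       ((xs.map f).filter (fun n => decide (n ≠ ""))).foldl PySem.Set.add s) := by
  induction xs generalizing s with
  | nil => simp
  | cons x xs ih =>
    simp only [List.foldl_cons, List.map_cons, List.filter_cons]
    by_cases h1 : f x = ""
    · simpa [h1] using ih s
    · by_cases h2 : f x ∈ s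
      · have hadd : PySem.Set.add s (f x) = s := by
          unfold PySem.Set.add; rw [if_pos]; simpa using h2
        simpa [h1, h2, hadd] using ih s
      · have hadd : PySem.Set.add s (f x) = s ++ [f x] := by
          unfold PySem.Set.add; rw [if_neg]; simpa using h2
        simpa [h1, h2, hadd] using ih (s ++ [f x])

-- folding Set.add over a list appends the delete-later-copies dedup of the unseen elements
theorem pvSetFold (l : List String) (s : List String) :
    l.foldl PySem.Set.add s = s ++ pvDedupF (l.filter (fun x => decide (x ∉ s))) := by
  induction l generalizing s with
  | nil => simp [pvDedupF_nil]
  | cons h t ih =>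
    simp only [List.foldl_cons, List.filter_cons]
    by_cases hm : h ∈ s
    · have hadd : PySem.Set.add s h = s := by
        unfold PySem.Set.add; rw [if_pos]; simpa using hm
      simpa [hm, hadd] using ih s
    · have hadd : PySem.Set.add s h = s ++ [h] := by
        unfold PySem.Set.add; rw [if_neg]; simpa using hm
      have hfilt : t.filter (fun x => decide (x ∉ s ++ [h]))
          = (t.filter (fun x => decide (x ∉ s))).filter (fun x => decide (x ≠ h)) := by
        rw [List.filter_filter]
        apply List.filter_congr
        intro x _
        by_cases hx1 : x = h <;> by_cases hx2 : x ∈ s <;> simp [hx1, hx2]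
      rw [hadd, ih (s ++ [h]), hfilt]
      simp [hm, pvDedupF_cons]

theorem pvSetFold0 (l : List String) : l.foldl PySem.Set.add [] = pvDedupF l := by
  rw [pvSetFold]
  simp

-- B's _dedup equals the proof-helper dedup of the nonempty-filtered list
theorem pvDedupB_eq (l : List String) :
    pvDedupB l = pvDedupF (l.filter (fun x => decide (x ≠ ""))) := by
  have key : ∀ n (l : List String), l.length ≤ n →
      pvDedupB l = pvDedupF (l.filter (fun x => decide (x ≠ ""))) := by
    intro n
    induction n with
    | zero =>
      intro l hl
      have : l = [] := List.eq_nil_of_length_eq_zero (Nat.le_zero.mp hl)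
      simp [this, pvDedupB_nil, pvDedupF_nil]
    | succ n ih =>
      intro l hl
      cases l with
      | nil => simp [pvDedupB_nil, pvDedupF_nil]
      | cons h t =>
        rw [pvDedupB_cons, List.filter_cons]
        by_cases hh : h = ""
        · simpa [hh] using ih t (by simpa using hl)
        · have hlen : (t.filter (fun x => decide (x ≠ h))).length ≤ n := by
            have := List.length_filter_le (fun x => decide (x ≠ h)) t
            simp at hl
            omega
          have hfilt : (t.filter (fun x => decide (x ≠ h))).filter (fun x => decide (x ≠ ""))
              = (t.filter (fun x => decide (x ≠ ""))).filter (fun x => decide (x ≠ h)) := by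
            rw [List.filter_filter, List.filter_filter]
            apply List.filter_congr
            intro x _
            by_cases hx1 : x = h <;> by_cases hx2 : x = "" <;> simp [hx1, hx2]
          rw [if_neg hh, ih _ hlen, hfilt]
          simp [hh, pvDedupF_cons]
  exact key l.length l le_rfl

-- ===== VERDICT (by name: the statement is the Claim_ definition above) =====
theorem extract_navigation_names_py_spec : Claim_equal_extract_navigation_names_py := by
  intro payload drain _
  unfold Spec_extract_navigation_names_py extract_navigation_names_py extract_navigation_names_py_alt
  simp only [pvLoop_eq, pvDedupB_eq, pvSetFold0]
  set primary := ((if (List.lookup "vector" ((List.lookup "navigation" payload).getD [])).getD [] = []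
      then (List.lookup "items" ((List.lookup "navigation" payload).getD [])).getD []
      else (List.lookup "vector" ((List.lookup "navigation" payload).getD [])).getD []).map
        PySem.Str.strip) with hprim
  by_cases hp : primary.filter (fun n => decide (n ≠ "")) = []
  · have hany0 : primary.any (fun n => decide (n ≠ "")) = false := by
      rw [List.any_eq_false]
      intro x hx
      simpa using (List.filter_eq_nil_iff.mp hp) x hx
    rw [hp, pvDedupF_nil, if_pos rfl, hany0]
    simp only [Bool.false_eq_true, if_false]
    exact pvSetFold0 _
  · have hne : pvDedupF (primary.filter (fun n => decide (n ≠ ""))) ≠ [] := by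
      simpa [pvDedupF_nil_iff] using hp
    have hany1 : primary.any (fun n => decide (n ≠ "")) = true := by
      rcases List.exists_mem_of_ne_nil _ hp with ⟨x, hx⟩
      rcases List.mem_filter.mp hx with ⟨hx1, hx2⟩
      exact List.any_eq_true.mpr ⟨x, hx1, hx2⟩
    rw [if_neg hne, hany1]
    simp
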